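-- pv_equiv track=rewrite | github.com/gitmario10salazarutn/cde-curve | utils/find_face.py | found_min_max_points
-- ===== SOURCE A (Python) =====
-- def found_min_max_points(grand_truth):
--     x = []
--     y = []
--     for coord_x, coord_y in grand_truth:
--         x.append(coord_x)
--         y.append(coord_y)
--     x_min = min(x)
--     x_max = max(x)
--     y_min = min(y)
--     y_max = max(y)
--     return int(x_min), int(y_min), int(x_max), int(y_max)
-- ===== SOURCE B (Python) =====
-- def found_min_max_points(grand_truth):
--     (x_min, y_min) = grand_truth[0]
--     x_max, y_max = x_min, y_min
--     for coord_x, coord_y in grand_truth[1:]: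
--         if coord_x < x_min:
--             x_min = coord_x
--         if coord_x > x_max:
--             x_max = coord_x
--         if coord_y < y_min:
--             y_min = coord_y
--         if coord_y > y_max:
--             y_max = coord_y
--     return int(x_min), int(y_min), int(x_max), int(y_max)
-- ===== Notes on version B (the rewrite author's own statement) =====
-- stated objective: simpler
-- what changed: Single pass with four running min/max accumulators seeded from the first pair, instead of building two full coordinate lists and scanning each twice with min()/max().
import Mathlib
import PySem

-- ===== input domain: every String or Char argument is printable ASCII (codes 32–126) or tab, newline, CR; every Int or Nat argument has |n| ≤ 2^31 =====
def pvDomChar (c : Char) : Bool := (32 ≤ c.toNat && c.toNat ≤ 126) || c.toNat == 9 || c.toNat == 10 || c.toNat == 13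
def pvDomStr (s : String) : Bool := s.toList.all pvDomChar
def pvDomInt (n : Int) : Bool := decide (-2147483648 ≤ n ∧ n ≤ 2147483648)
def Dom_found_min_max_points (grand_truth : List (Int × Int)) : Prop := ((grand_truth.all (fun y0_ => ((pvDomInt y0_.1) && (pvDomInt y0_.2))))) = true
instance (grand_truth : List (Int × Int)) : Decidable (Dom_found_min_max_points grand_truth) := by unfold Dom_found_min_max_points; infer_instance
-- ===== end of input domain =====

-- B replaces A's two O(n)-space coordinate lists + four min/max scans by one pass with
-- four running accumulators (objective: simpler, O(1) extra space; same asymptotic time).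


-- ===== PORT A =====
-- loop appending to x, y; then min/max of each list; int() is the identity on ints
def found_min_max_points (grand_truth : List (Int × Int)) : Int × Int × Int × Int :=
  let xy := grand_truth.foldl
    (fun (acc : List Int × List Int) p => (acc.1 ++ [p.1], acc.2 ++ [p.2])) ([], [])
  match PySem.List.min? xy.1 (fun v => v), PySem.List.max? xy.1 (fun v => v),
        PySem.List.min? xy.2 (fun v => v), PySem.List.max? xy.2 (fun v => v) with
  | some x_min, some x_max, some y_min, some y_max => (x_min, y_min, x_max, y_max)
  | _, _, _, _ => (0, 0, 0, 0)   -- unreachable under Pre_ (min([]) raises ValueError)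

-- ===== PORT B =====
-- seed the four accumulators from grand_truth[0], one pass over grand_truth[1:]
def found_min_max_points_alt (grand_truth : List (Int × Int)) : Int × Int × Int × Int :=
  match grand_truth with
  | [] => (0, 0, 0, 0)   -- unreachable under Pre_ (grand_truth[0] raises IndexError)
  | (x0, y0) :: rest =>
    let s := rest.foldl
      (fun (s : Int × Int × Int × Int) p =>
        let (x_min, x_max, y_min, y_max) := s
        let x_min := if p.1 < x_min then p.1 else x_min
        let x_max := if p.1 > x_max then p.1 else x_max
        let y_min := if p.2 < y_min then p.2 else y_min
        let y_max := if p.2 > y_max then p.2 else y_max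
        (x_min, x_max, y_min, y_max))
      (x0, x0, y0, y0)
    (s.1, s.2.2.1, s.2.1, s.2.2.2)

-- ===== PRECONDITION & SPEC =====
-- Pre_ excludes only the empty list, on which A raises ValueError (min of an empty list).
def Pre_found_min_max_points (grand_truth : List (Int × Int)) : Prop := grand_truth ≠ []
instance (grand_truth : List (Int × Int)) : Decidable (Pre_found_min_max_points grand_truth) := by unfold Pre_found_min_max_points; infer_instance
def pvWitness_found_min_max_points : (List (Int × Int)) := [(3, -1), (0, 7)]

def Spec_found_min_max_points (grand_truth : List (Int × Int)) (out : Int × Int × Int × Int) : Prop := out = found_min_max_points_alt grand_truth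
instance (grand_truth : List (Int × Int)) (out : Int × Int × Int × Int) : Decidable (Spec_found_min_max_points grand_truth out) := by unfold Spec_found_min_max_points; infer_instance

-- ===== CLAIM (what is proved, stated in full; the proofs are below) =====
def Claim_equal_found_min_max_points : Prop := ∀ (grand_truth : List (Int × Int)), Dom_found_min_max_points grand_truth → Pre_found_min_max_points grand_truth → Spec_found_min_max_points grand_truth (found_min_max_points grand_truth)

-- ===== LEMMAS AND PROOFS =====

-- A's append loop builds the two projection lists
theorem pv_xy_eq (grand_truth : List (Int × Int)) :
    grand_truth.foldl (fun (acc : List Int × List Int) p => (acc.1 ++ [p.1], acc.2 ++ [p.2])) ([], [])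
      = (grand_truth.map Prod.fst, grand_truth.map Prod.snd) := by
  have h : ∀ (l : List (Int × Int)) (a b : List Int),
      l.foldl (fun (acc : List Int × List Int) p => (acc.1 ++ [p.1], acc.2 ++ [p.2])) (a, b)
        = (a ++ l.map Prod.fst, b ++ l.map Prod.snd) := by
    intro l
    induction l with
    | nil => simp
    | cons p t ih => intro a b; simp [List.foldl, ih]
  simpa using h grand_truth [] []

-- B's stepper, named for the invariant proof
def pvStep (s : Int × Int × Int × Int) (p : Int × Int) : Int × Int × Int × Int :=
  let (x_min, x_max, y_min, y_max) := s
  let x_min := if p.1 < x_min then p.1 else x_min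
  let x_max := if p.1 > x_max then p.1 else x_max
  let y_min := if p.2 < y_min then p.2 else y_min
  let y_max := if p.2 > y_max then p.2 else y_max
  (x_min, x_max, y_min, y_max)

-- one pass maintaining the four accumulators = the four separate running folds
theorem pv_fold_eq (l : List (Int × Int)) (a b c d : Int) :
    l.foldl pvStep (a, b, c, d)
      = ((l.map Prod.fst).foldl min a, (l.map Prod.fst).foldl max b,
         (l.map Prod.snd).foldl min c, (l.map Prod.snd).foldl max d) := by
  have hstep : ∀ (a b c d : Int) (p : Int × Int),
      pvStep (a, b, c, d) p = (min a p.1, max b p.1, min c p.2, max d p.2) := by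
    intro a b c d p
    simp only [pvStep, min_def, max_def, Prod.mk.injEq]
    refine ⟨?_, ?_, ?_, ?_⟩ <;> split_ifs <;> omega
  induction l generalizing a b c d with
  | nil => rfl
  | cons p t ih => simp only [List.foldl, List.map, hstep, ih]

-- ===== VERDICT (by name: the statement is the Claim_ definition above) =====
theorem found_min_max_points_spec : Claim_equal_found_min_max_points := by
  intro gt _ hpre
  unfold Spec_found_min_max_points found_min_max_points found_min_max_points_alt
  match gt with
  | [] => exact absurd rfl hpre
  | (x0, y0) :: rest =>
    have hx : ((x0, y0) :: rest).map Prod.fst = x0 :: rest.map Prod.fst := by simp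
    have hy : ((x0, y0) :: rest).map Prod.snd = y0 :: rest.map Prod.snd := by simp
    simp only [pv_xy_eq, hx, hy,
      PySem.List.min?_id_cons, PySem.List.max?_id_cons]
    have := pv_fold_eq rest x0 x0 y0 y0
    simp only [show (fun (s : Int × Int × Int × Int) (p : Int × Int) =>
        let (x_min, x_max, y_min, y_max) := s
        let x_min := if p.1 < x_min then p.1 else x_min
        let x_max := if p.1 > x_max then p.1 else x_max
        let y_min := if p.2 < y_min then p.2 else y_min
        let y_max := if p.2 > y_max then p.2 else y_max
        (x_min, x_max, y_min, y_max)) = pvStep from rfl, this]
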